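-- pv_equiv track=rewrite | github.com/wolfgangmuender/AdventOfCode | 2023/aoc12.py | cluster_sizes
-- ===== SOURCE A (Python) =====
-- def cluster_sizes(records):
--     sizes = []
--     curr = 0
--     for r in records:
--         if r == ".":
--             if curr:
--                 sizes.append(curr)
--             curr = 0
--         else:
--             curr += 1
--     if curr:
--         sizes.append(curr)
--     return sizes
-- ===== SOURCE B (Python) =====
-- def cluster_sizes(records):
--     clusters = "".join("." if r == "." else "#" for r in records).split(".")
--     return [len(c) for c in clusters if c]
-- ===== Notes on version B (the rewrite author's own statement) =====
-- stated objective: simpler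
-- what changed: B replaces A's running counter with flush-on-dot and end-of-loop flush by building a dot/non-dot mask string, splitting it on '.', and returning the lengths of the nonempty pieces.
import Mathlib
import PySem

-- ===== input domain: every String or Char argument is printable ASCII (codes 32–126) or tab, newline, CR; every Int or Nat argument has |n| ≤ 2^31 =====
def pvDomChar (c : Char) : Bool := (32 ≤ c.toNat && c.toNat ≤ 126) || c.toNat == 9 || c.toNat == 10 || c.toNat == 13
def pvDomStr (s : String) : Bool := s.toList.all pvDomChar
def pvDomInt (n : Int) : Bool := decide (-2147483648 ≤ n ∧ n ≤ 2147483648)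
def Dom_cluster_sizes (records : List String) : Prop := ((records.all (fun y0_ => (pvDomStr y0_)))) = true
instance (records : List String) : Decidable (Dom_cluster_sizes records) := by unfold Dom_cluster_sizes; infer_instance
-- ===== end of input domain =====

-- B replaces A's running counter and flush logic by one split on '.' of the
-- dot/non-dot mask followed by measuring the nonempty pieces (objective: simpler).

-- ===== PORT A =====
-- state = (sizes, curr); Python's `if curr:` is `curr ≠ 0`; the loop body as a named step
def stepA (st : List Int × Int) (r : String) : List Int × Int :=
  if r == "." then
    (if st.2 ≠ 0 then (st.1 ++ [st.2], 0) else (st.1, 0))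
  else (st.1, st.2 + 1)

def cluster_sizes (records : List String) : List Int :=
  let st := records.foldl stepA ([], 0)
  if st.2 ≠ 0 then st.1 ++ [st.2] else st.1

-- ===== PORT B =====
-- Source B: mask = "".join("." if r == "." else "#" for r in records); pieces = mask.split(".");
-- return [len(c) for c in pieces if c].  str.split(".") on the mask = List.splitOn '.'.
def cluster_sizes_alt (records : List String) : List Int :=
  let clusters := (records.map (fun r => if r == "." then '.' else '#')).splitOn '.'
  (clusters.filter (fun c => c ≠ [])).map (fun c => (c.length : Int))

-- ===== PRECONDITION & SPEC =====
def Spec_cluster_sizes (records : List String) (out : List Int) : Prop := out = cluster_sizes_alt records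
instance (records : List String) (out : List Int) : Decidable (Spec_cluster_sizes records out) := by unfold Spec_cluster_sizes; infer_instance

-- ===== CLAIM (what is proved, stated in full; the proofs are below) =====
def Claim_equal_cluster_sizes : Prop := ∀ (records : List String), Dom_cluster_sizes records → Spec_cluster_sizes records (cluster_sizes records)

-- ===== LEMMAS AND PROOFS =====

-- A's loop as a structural recursion on the record list (curr is the pending run length)
def gAux : List String → Int → List Int
  | [], curr => if curr ≠ 0 then [curr] else []
  | r :: rs, curr =>
    if r == "." then (if curr ≠ 0 then [curr] else []) ++ gAux rs 0
    else gAux rs (curr + 1)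

lemma foldA (rs : List String) : ∀ (sizes : List Int) (curr : Int),
    (let st := rs.foldl stepA (sizes, curr)
     ; if st.2 ≠ 0 then st.1 ++ [st.2] else st.1) = sizes ++ gAux rs curr := by
  induction rs with
  | nil =>
    intro sizes curr
    simp only [List.foldl_nil, gAux]
    split <;> simp
  | cons r rs ih =>
    intro sizes curr
    simp only [List.foldl_cons]
    by_cases hr : r == "."
    · by_cases hc : curr = 0
      · rw [show stepA (sizes, curr) r = (sizes, 0) by simp [stepA, hr, hc], ih]
        simp [gAux, hr, hc]
      · rw [show stepA (sizes, curr) r = (sizes ++ [curr], 0) by simp [stepA, hr, hc], ih]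
        simp [gAux, hr, hc]
    · rw [show stepA (sizes, curr) r = (sizes, curr + 1) by simp [stepA, hr], ih]
      simp [gAux, hr]

-- B's value with a pending prefix of length `curr` folded into the first piece
def packs (curr : Int) (cs : List Char) : List Int :=
  match cs.splitOn '.' with
  | [] => []
  | h :: t =>
    (if curr + (h.length : Int) ≠ 0 then [curr + (h.length : Int)] else [])
      ++ (t.filter (fun c => c ≠ [])).map (fun c => (c.length : Int))

lemma seg (rs : List String) : ∀ (curr : Int), 0 ≤ curr →
    gAux rs curr = packs curr (rs.map (fun r => if r == "." then '.' else '#')) := by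
  induction rs with
  | nil =>
    intro curr _
    simp [gAux, packs, List.splitOn, List.splitOnP_nil]
  | cons r rs ih =>
    intro curr hc
    by_cases hr : r == "."
    · -- head is a dot: split starts a fresh (empty) piece
      simp only [List.map_cons, hr, if_pos, gAux, packs, List.splitOn, List.splitOnP_cons,
        beq_self_eq_true]
      rcases hrest : List.splitOnP (fun b => b == '.') (rs.map (fun r => if r == "." then '.' else '#')) with _ | ⟨h', t'⟩
      · exact absurd hrest (List.splitOnP_ne_nil _ _)
      · have := ih 0 le_rfl
        simp only [packs, List.splitOn, hrest] at this
        simp only [this]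
        simp only [List.length_nil, Int.natCast_zero, add_zero, List.filter_cons]
        by_cases hh : h' = []
        · simp [hh]
        · simp [hh]
    · -- head is not a dot: it extends the first piece
      simp only [List.map_cons, hr, gAux, packs, List.splitOn, List.splitOnP_cons]
      rcases hrest : List.splitOnP (fun b => b == '.') (rs.map (fun r => if r == "." then '.' else '#')) with _ | ⟨h', t'⟩
      · exact absurd hrest (List.splitOnP_ne_nil _ _)
      · have := ih (curr + 1) (by omega)
        simp only [packs, List.splitOn, hrest] at this
        simp only [Bool.false_eq_true, if_false, this, List.modifyHead_cons]
        have hne1 : curr + 1 + (h'.length : Int) ≠ 0 := by positivity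
        have hne2 : curr + ((h'.length + 1 : Nat) : Int) ≠ 0 := by push_cast; omega
        simp only [show ('#' == '.') = false by decide, Bool.false_eq_true, if_false,
          List.length_cons]
        have hlen : ((h'.length + 1 : Nat) : Int) = (h'.length : Int) + 1 := by push_cast; ring
        have harr : curr + ((h'.length : Int) + 1) = curr + 1 + (h'.length : Int) := by ring
        rw [hlen, harr]

lemma packs_zero (cs : List Char) :
    packs 0 cs = ((cs.splitOn '.').filter (fun c => c ≠ [])).map (fun c => (c.length : Int)) := by
  unfold packs
  rcases h : cs.splitOn '.' with _ | ⟨h', t'⟩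
  · simp
  · simp only [List.filter_cons]
    by_cases hh : h' = []
    · simp [hh]
    · simp [hh]

-- ===== VERDICT (by name: the statement is the Claim_ definition above) =====
theorem cluster_sizes_spec : Claim_equal_cluster_sizes := by
  intro records _
  unfold Spec_cluster_sizes cluster_sizes cluster_sizes_alt
  have h1 := foldA records [] 0
  simp only at h1
  rw [h1, List.nil_append, seg records 0 le_rfl, packs_zero]
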